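-- pv_equiv track=rewrite | github.com/cafe-jun/codingTest-Algo | programmers/월간챌린지2/110으로만들기.py | solution
-- ===== SOURCE A (Python) =====
-- from collections import deque
--
-- def solution(s: str):
--     answer = []
--     # 큐를 이용하여 110을 찾자
--     for x in s:
--         cnt = 0
--         temp = []
--         for c in x:
--             if c == '0':
--                 if temp[-2:] == ['1', '1']:
--                     cnt += 1
--                     temp.pop()
--                     temp.pop()
--                 else:
--                     temp.append(c)
--             else:
--                 temp.append(c)
--         if cnt == 0:
--             answer.append(x)
--         # 110이 있다면
--         else:
--             final = deque()
--             # 0이 나오기 전까지는 append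
--             while temp:
--                 if temp[-1] == '1':
--                     final.append(temp.pop())
--                 elif temp[-1] == '0':
--                     break
--
--             # 0이 나왔다면 110을 주어진 count만큼 append
--             while cnt > 0:
--                 final.appendleft('0')
--                 final.appendleft('1')
--                 final.appendleft('1')
--                 cnt -= 1
--
--             # stack에 남아있는거 다 추가
--             while temp:
--                 final.appendleft(temp.pop())
--             answer.append(''.join(final))
--     return answer
-- ===== SOURCE B (Python) =====
-- def solution(s: str):
--     answer = []
--     for x in s:
--         # one pass with counters: head = residue up to its last non-'1' char,
--         # k = pending run of trailing '1's, cnt = number of '110' blocks removed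
--         head = []
--         k = 0
--         cnt = 0
--         for c in x:
--             if c == '1':
--                 k += 1
--             elif c == '0':
--                 if k >= 2:
--                     cnt += 1
--                     k -= 2
--                 else:
--                     head.append('1' * k)
--                     head.append('0')
--                     k = 0
--             else:
--                 head.append('1' * k)
--                 head.append(c)
--                 k = 0
--         answer.append(''.join(head) + '110' * cnt + '1' * k)
--     return answer
-- ===== Notes on version B (the rewrite author's own statement) =====
-- stated objective: simpler
-- what changed: Replaces A's character stack plus three-loop deque reconstruction by a single pass that keeps a head buffer and two counters (pending trailing '1's and removed '110' blocks) and emits head + '110'*cnt + '1'*k directly.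
-- outside the precondition, e.g. on solution(['a0110']): A returns ['a0110'], B returns ['a0110']; on solution(['a110']): A does not finish within the time limit, B returns ['a110']
import Mathlib
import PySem

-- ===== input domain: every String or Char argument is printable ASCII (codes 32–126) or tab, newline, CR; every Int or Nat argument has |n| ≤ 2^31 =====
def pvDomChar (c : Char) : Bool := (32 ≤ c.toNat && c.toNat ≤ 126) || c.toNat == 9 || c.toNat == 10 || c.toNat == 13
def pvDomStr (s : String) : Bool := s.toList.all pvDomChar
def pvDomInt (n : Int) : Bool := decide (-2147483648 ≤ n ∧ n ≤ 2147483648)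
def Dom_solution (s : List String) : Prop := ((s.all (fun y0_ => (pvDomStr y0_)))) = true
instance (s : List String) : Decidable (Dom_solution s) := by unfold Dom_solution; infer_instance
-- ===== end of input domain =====

-- B replaces A's character stack and three-loop deque reconstruction by a single pass
-- keeping a head buffer plus two counters, emitting head + "110"*cnt + "1"*k directly (simpler).

-- ===== PORT A =====
-- inner `for c in x` loop body; state = (temp, cnt); cnt is Python's nonnegative int counter
def pvStepA (st : List Char × Nat) (c : Char) : List Char × Nat :=
  let temp := st.1
  let cnt := st.2
  if c = '0' then
    if temp.drop (temp.length - 2) = ['1', '1'] then   -- temp[-2:] == ['1', '1']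
      (temp.dropLast.dropLast, cnt + 1)                -- temp.pop(); temp.pop()
    else
      (temp ++ [c], cnt)
  else
    (temp ++ [c], cnt)

-- `while temp: if temp[-1]=='1': final.append(temp.pop()) elif temp[-1]=='0': break`
-- (final collects the popped '1's; when the last char is neither '1' nor '0' Python
--  spins forever — those inputs are excluded by Pre_solution; this port exits the loop there)
def pvPopOnesA (temp final : List Char) : List Char × List Char :=
  if h : temp = [] then (temp, final)
  else if temp.getLast h = '1' then pvPopOnesA temp.dropLast (final ++ ['1'])
  else (temp, final)
termination_by temp.length
decreasing_by
  have := List.length_pos_iff.mpr h; simp [List.length_dropLast]; omega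

-- `while cnt > 0: final.appendleft('0'); final.appendleft('1'); final.appendleft('1'); cnt -= 1`
def pvBlocksA : Nat → List Char → List Char
  | 0, final => final
  | n + 1, final => pvBlocksA n ('1' :: '1' :: '0' :: final)

-- `while temp: final.appendleft(temp.pop())`
def pvUnstackA (temp final : List Char) : List Char :=
  if h : temp = [] then final
  else pvUnstackA temp.dropLast (temp.getLast h :: final)
termination_by temp.length
decreasing_by
  have := List.length_pos_iff.mpr h; simp [List.length_dropLast]; omega

-- per-string body of A's `for x in s` loop
def pvOneA (x : String) : String :=
  if (x.toList.foldl pvStepA ([], 0)).2 = 0 then x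
  else
    String.ofList (pvUnstackA (pvPopOnesA (x.toList.foldl pvStepA ([], 0)).1 []).1
      (pvBlocksA (x.toList.foldl pvStepA ([], 0)).2
        (pvPopOnesA (x.toList.foldl pvStepA ([], 0)).1 []).2))

def solution (s : List String) : List String :=
  s.map pvOneA

-- ===== PORT B =====
-- inner loop body of Source B; state = (head, k, cnt)
def pvStepB (st : List Char × Nat × Nat) (c : Char) : List Char × Nat × Nat :=
  let head := st.1
  let k := st.2.1
  let cnt := st.2.2
  if c = '1' then (head, k + 1, cnt)
  else if c = '0' then
    if 2 ≤ k then (head, k - 2, cnt + 1)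
    else (head ++ List.replicate k '1' ++ ['0'], 0, cnt)
  else (head ++ List.replicate k '1' ++ [c], 0, cnt)

-- per-string body of Source B: ''.join(head) + '110' * cnt + '1' * k
def pvOneB (x : String) : String :=
  String.ofList ((x.toList.foldl pvStepB ([], 0, 0)).1
    ++ List.flatten (List.replicate (x.toList.foldl pvStepB ([], 0, 0)).2.2 ['1', '1', '0'])
    ++ List.replicate (x.toList.foldl pvStepB ([], 0, 0)).2.1 '1')

def solution_alt (s : List String) : List String :=
  s.map pvOneB

-- ===== PRECONDITION & SPEC =====
-- Pre_ excludes strings that combine a character other than '0'/'1' with a "110" substring: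
-- on such strings Python A's reconstruction `while` loop can spin forever (e.g. on ["a110"]
-- it never terminates); on the excluded strings where A does happen to return, B returns the
-- same value (the ports agree even there), so nothing else is carved out.
def Pre_solution (s : List String) : Prop :=
  ∀ x ∈ s, x.toList.all (fun c => c == '0' || c == '1') = true     -- x is a binary string, or
           ∨ ¬ (PySem.Str.isIn "110" x = true)                     -- x has no "110" substring (then nothing is removed)
instance (s : List String) : Decidable (Pre_solution s) := by unfold Pre_solution; infer_instance
def pvWitness_solution : List String := ["0110110", "abc 01"]

def Spec_solution (s : List String) (out : List String) : Prop := out = solution_alt s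
instance (s : List String) (out : List String) : Decidable (Spec_solution s out) := by unfold Spec_solution; infer_instance

-- ===== CLAIM (what is proved, stated in full; the proofs are below) =====
def Claim_equal_solution : Prop := ∀ (s : List String), Dom_solution s → Pre_solution s → Spec_solution s (solution s)

-- ===== LEMMAS AND PROOFS =====

-- B's block counter never decreases along the fold
theorem pvFoldB_cnt_mono (cs : List Char) : ∀ (head : List Char) (k cnt : Nat),
    cnt ≤ (List.foldl pvStepB (head, k, cnt) cs).2.2 := by
  induction cs with
  | nil => intro head k cnt; simp
  | cons c cs ih =>
    intro head k cnt
    simp only [List.foldl_cons, pvStepB]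
    split_ifs with h1 h2 h3
    · exact ih ..
    · exact le_trans (Nat.le_succ cnt) (ih ..)
    · exact ih ..
    · exact ih ..

-- if the fold removed no block, B's residue is exactly the input consumed so far
theorem pvFoldB_cnt_eq (cs : List Char) : ∀ (head : List Char) (k cnt : Nat),
    (List.foldl pvStepB (head, k, cnt) cs).2.2 = cnt →
    (List.foldl pvStepB (head, k, cnt) cs).1
        ++ List.replicate (List.foldl pvStepB (head, k, cnt) cs).2.1 '1'
      = head ++ List.replicate k '1' ++ cs := by
  induction cs with
  | nil => intro head k cnt _; simp
  | cons c cs ih =>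
    intro head k cnt hc
    simp only [List.foldl_cons, pvStepB] at hc ⊢
    split_ifs at hc ⊢ with h1 h2 h3
    · subst h1
      rw [ih _ _ _ hc]
      simp [List.replicate_succ' (n := k)]
    · exfalso
      have := pvFoldB_cnt_mono cs head (k - 2) (cnt + 1)
      omega
    · subst h2
      rw [ih _ _ _ hc]
      simp
    · rw [ih _ _ _ hc]
      simp

-- A's removal test is true when at least two '1's are pending
theorem pvDropTwo (l : List Char) (k : Nat) (h : 2 ≤ k) :
    List.drop (l.length + k - 2) (l ++ List.replicate k '1') = ['1', '1'] := by
  have hl : l.length + k - 2 = l.length + (k - 2) := by omega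
  rw [hl, List.drop_append]
  have h1 : List.drop (l.length + (k - 2)) l = [] := List.drop_eq_nil_of_le (by omega)
  have h2 : l.length + (k - 2) - l.length = k - 2 := by omega
  have h3 : k - (k - 2) = 2 := by omega
  rw [h1, h2, List.drop_replicate, h3]; rfl

-- the double pop removes exactly two pending '1's
theorem pvDropLastTwo (l : List Char) (k : Nat) (h : 2 ≤ k) :
    (l ++ List.replicate k '1').dropLast.dropLast = l ++ List.replicate (k - 2) '1' := by
  have hrep : List.replicate k '1' = List.replicate (k - 2) '1' ++ ['1'] ++ ['1'] := by
    have hk : k = (k - 2) + 1 + 1 := by omega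
    rw [hk]; simp [List.replicate_succ']
  rw [hrep]; simp [← List.append_assoc]

-- A's removal test is false when fewer than two '1's are pending and head does not end in '1'
theorem pvDropTwoNe (head : List Char) (k : Nat) (hk : k < 2) (hh : head.getLast? ≠ some '1') :
    ¬ (List.drop (head.length + k - 2) (head ++ List.replicate k '1') = ['1', '1']) := by
  intro hd
  interval_cases k
  · simp only [List.replicate_zero, List.append_nil, Nat.add_zero] at hd
    have h4 := List.take_append_drop (head.length - 2) head
    rw [hd] at h4
    apply hh
    rw [← h4]
    simp [List.getLast?_append]
  · simp only [List.replicate_one] at hd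
    have h4 := List.take_append_drop (head.length + 1 - 2) (head ++ ['1'])
    rw [hd] at h4
    have h5 : (head ++ ['1']).take (head.length + 1 - 2) ++ ['1'] = head :=
      List.append_cancel_right (by simpa using h4)
    apply hh
    rw [← h5]
    simp [List.getLast?_append]

-- the simulation: A's stack state is B's head ++ pending '1's, with equal counters,
-- and B's head never ends in '1'
theorem pvFoldAB (cs : List Char) : ∀ (head : List Char) (k cnt : Nat),
    head.getLast? ≠ some '1' →
    List.foldl pvStepA (head ++ List.replicate k '1', cnt) cs
        = ((List.foldl pvStepB (head, k, cnt) cs).1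
             ++ List.replicate (List.foldl pvStepB (head, k, cnt) cs).2.1 '1',
           (List.foldl pvStepB (head, k, cnt) cs).2.2)
      ∧ (List.foldl pvStepB (head, k, cnt) cs).1.getLast? ≠ some '1' := by
  induction cs with
  | nil => intro head k cnt h; exact ⟨rfl, h⟩
  | cons c cs ih =>
    intro head k cnt h
    simp only [List.foldl_cons]
    by_cases hc1 : c = '1'
    · subst hc1
      have hA : pvStepA (head ++ List.replicate k '1', cnt) '1'
          = (head ++ List.replicate (k + 1) '1', cnt) := by
        simp [pvStepA, List.replicate_succ' (n := k)]
      have hB : pvStepB (head, k, cnt) '1' = (head, k + 1, cnt) := by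
        simp [pvStepB]
      rw [hA, hB]
      exact ih head (k + 1) cnt h
    · by_cases hc0 : c = '0'
      · subst hc0
        by_cases hk : 2 ≤ k
        · have hA : pvStepA (head ++ List.replicate k '1', cnt) '0'
              = (head ++ List.replicate (k - 2) '1', cnt + 1) := by
            simp [pvStepA, pvDropTwo head k hk, pvDropLastTwo head k hk]
          have hB : pvStepB (head, k, cnt) '0' = (head, k - 2, cnt + 1) := by
            simp [pvStepB, hk]
          rw [hA, hB]
          exact ih head (k - 2) (cnt + 1) h
        · have hA : pvStepA (head ++ List.replicate k '1', cnt) '0'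
              = ((head ++ List.replicate k '1' ++ ['0']) ++ List.replicate 0 '1', cnt) := by
            simp [pvStepA, pvDropTwoNe head k (by omega) h]
          have hB : pvStepB (head, k, cnt) '0'
              = (head ++ List.replicate k '1' ++ ['0'], 0, cnt) := by
            simp [pvStepB, hk]
          rw [hA, hB]
          exact ih _ 0 cnt (by simp)
      · have hA : pvStepA (head ++ List.replicate k '1', cnt) c
            = ((head ++ List.replicate k '1' ++ [c]) ++ List.replicate 0 '1', cnt) := by
          simp [pvStepA, hc0]
        have hB : pvStepB (head, k, cnt) c
            = (head ++ List.replicate k '1' ++ [c], 0, cnt) := by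
          simp [pvStepB, hc0, hc1]
        rw [hA, hB]
        refine ih _ 0 cnt ?_
        simp [List.getLast?_append]
        exact hc1

-- A's first reconstruction loop pops exactly the pending '1's
theorem pvPopOnes_spec (k : Nat) : ∀ (head f : List Char), head.getLast? ≠ some '1' →
    pvPopOnesA (head ++ List.replicate k '1') f = (head, f ++ List.replicate k '1') := by
  induction k with
  | zero =>
    intro head f h
    rw [pvPopOnesA]
    simp only [List.replicate_zero, List.append_nil]
    split_ifs with h1 h2
    · subst h1; rfl
    · exact absurd (by rw [List.getLast?_eq_some_getLast h1, h2]) h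
    · rfl
  | succ k ih =>
    intro head f h
    have hne : head ++ List.replicate (k + 1) '1' ≠ [] := by simp
    have hlast : (head ++ List.replicate (k + 1) '1').getLast hne = '1' := by
      have : (head ++ List.replicate (k + 1) '1').getLast? = some '1' := by
        simp [List.getLast?_append, List.replicate_succ' (n := k)]
      rw [List.getLast?_eq_some_getLast hne] at this
      exact Option.some.inj this
    have hdrop : (head ++ List.replicate (k + 1) '1').dropLast = head ++ List.replicate k '1' := by
      rw [List.replicate_succ' (n := k), ← List.append_assoc]
      simp
    rw [pvPopOnesA]
    rw [dif_neg hne, if_pos hlast, hdrop, ih head (f ++ ['1']) h]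
    simp [List.replicate_succ (n := k)]

-- A's second loop prepends cnt copies of "110"
theorem pvBlocks_spec (n : Nat) : ∀ (f : List Char),
    pvBlocksA n f = List.flatten (List.replicate n ['1', '1', '0']) ++ f := by
  induction n with
  | zero => intro f; simp [pvBlocksA]
  | succ n ih =>
    intro f
    rw [pvBlocksA, ih, List.replicate_succ']
    simp

-- A's third loop prepends the remaining stack in order
theorem pvUnstack_spec (temp : List Char) : ∀ (f : List Char),
    pvUnstackA temp f = temp ++ f := by
  induction hn : temp.length using Nat.strong_induction_on generalizing temp with
  | _ n ih =>
    intro f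
    rw [pvUnstackA]
    split_ifs with h1
    · subst h1; rfl
    · have hlen : temp.dropLast.length < n := by
        have := List.length_pos_iff.mpr h1
        simp [List.length_dropLast]; omega
      rw [ih _ hlen _ rfl]
      conv_rhs => rw [← List.dropLast_concat_getLast h1]
      simp

-- per-string agreement of the two ports
theorem pvOne_eq (x : String) : pvOneA x = pvOneB x := by
  unfold pvOneA pvOneB
  obtain ⟨hAB, hlast⟩ := pvFoldAB x.toList [] 0 0 (by simp)
  simp only [List.replicate_zero, List.append_nil] at hAB
  rw [hAB]
  by_cases h0 : (List.foldl pvStepB ([], 0, 0) x.toList).2.2 = 0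
  · rw [if_pos h0, h0]
    have hres := pvFoldB_cnt_eq x.toList [] 0 0 h0
    simp only [List.replicate_zero, List.nil_append, List.append_nil] at hres
    simp only [List.replicate_zero, List.flatten_nil, List.append_nil]
    rw [hres]
    simp
  · rw [if_neg h0]
    rw [pvPopOnes_spec _ _ _ hlast]
    simp only [List.nil_append]
    rw [pvBlocks_spec, pvUnstack_spec]
    simp

-- ===== VERDICT (by name: the statement is the Claim_ definition above) =====
-- (Pre_solution marks where the Python A terminates; since the port of the stuck
--  reconstruction loop exits where Python spins, the ports agree without needing it)
theorem solution_spec : Claim_equal_solution := by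
  intro s _ _
  unfold Spec_solution solution solution_alt
  rw [funext pvOne_eq]
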